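-- pv_equiv track=rewrite | github.com/theRangeCoder/data-structures-and-algorithms | Easy/Palindromic Staircase.py | solve
-- ===== SOURCE A (Python) =====
-- def solve(n):
--     res_arr = []
--     for i in range(1, n + 1):
--         row_arr = []
--         for j in range(1, i + 1):
--             row_arr.append(str(j))
--         for k in range(i - 1, 0, -1):
--             row_arr.append(str(k))
--
--         row_arr = ''.join(row_arr)
--         res_arr.append(row_arr)
--
--     return res_arr
-- ===== SOURCE B (Python) =====
-- def solve(n):
--     res = []
--     up = ""
--     down = ""
--     for i in range(1, n + 1):
--         up += str(i)
--         res.append(up + down)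
--         down = str(i) + down
--     return res
-- ===== Notes on version B (the rewrite author's own statement) =====
-- stated objective: faster
-- what changed: Replaces A's two nested inner loops that rebuild each row from scratch with one flat pass maintaining two accumulator strings (ascending prefix, descending suffix) from which each row is derived incrementally.
import Mathlib
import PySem

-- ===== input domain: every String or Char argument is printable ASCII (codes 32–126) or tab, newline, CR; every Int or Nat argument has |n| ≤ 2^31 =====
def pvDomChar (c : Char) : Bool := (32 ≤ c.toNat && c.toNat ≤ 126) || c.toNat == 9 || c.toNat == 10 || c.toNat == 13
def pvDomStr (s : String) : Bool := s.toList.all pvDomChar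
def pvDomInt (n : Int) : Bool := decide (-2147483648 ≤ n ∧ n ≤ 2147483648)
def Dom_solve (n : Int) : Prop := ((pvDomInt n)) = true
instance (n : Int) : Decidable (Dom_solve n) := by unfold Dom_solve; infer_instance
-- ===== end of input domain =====

-- B replaces A's two nested inner loops with one flat pass over two accumulator strings
-- (ascending prefix / descending suffix), deriving each row from the previous state.

-- ===== PORT A =====
def solve (n : Int) : List String :=
  (PySem.List.pyRange 1 (n + 1) 1).foldl (fun res_arr i =>
    let row₁ := (PySem.List.pyRange 1 (i + 1) 1).foldl
      (fun acc j => acc ++ [PySem.Int.toStr j]) []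
    let row₂ := (PySem.List.pyRange (i - 1) 0 (-1)).foldl
      (fun acc k => acc ++ [PySem.Int.toStr k]) row₁
    res_arr ++ [PySem.Str.join "" row₂]) []

-- ===== PORT B =====
-- B's two string accumulators are modelled as List Char (PySem.Chars); each row is
-- turned into a String with String.ofList, exactly where Source B materialises up + down.
def solve_alt (n : Int) : List String :=
  ((PySem.List.pyRange 1 (n + 1) 1).foldl
    (fun (st : List String × List Char × List Char) i =>
      let up := st.2.1 ++ PySem.Int.toChars i
      (st.1 ++ [String.ofList (up ++ st.2.2)], up, PySem.Int.toChars i ++ st.2.2))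
    ([], [], [])).1

-- ===== PRECONDITION & SPEC =====
def Spec_solve (n : Int) (out : List String) : Prop := out = solve_alt n
instance (n : Int) (out : List String) : Decidable (Spec_solve n out) := by unfold Spec_solve; infer_instance

-- ===== CLAIM (what is proved, stated in full; the proofs are below) =====
def Claim_equal_solve : Prop := ∀ (n : Int), Dom_solve n → Spec_solve n (solve n)

-- ===== LEMMAS AND PROOFS =====

-- closed forms of the two accumulators after m iterations
def upC : Nat → List Char
  | 0 => []
  | m + 1 => upC m ++ PySem.Int.toChars ((m : Int) + 1)

def downC : Nat → List Char
  | 0 => []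
  | m + 1 => PySem.Int.toChars ((m : Int) + 1) ++ downC m

def rowsC : Nat → List String
  | 0 => []
  | m + 1 => rowsC m ++ [String.ofList (upC (m + 1) ++ downC m)]

theorem joinNil (ps : List (List Char)) : PySem.Chars.join [] ps = ps.flatten := by
  induction ps with
  | nil => rfl
  | cons a ps ih =>
      simp [PySem.Chars.join, List.intercalate] at ih ⊢
      cases ps with
      | nil => simp
      | cons b ps => simp_all [List.intersperse]

theorem mapUp (m : Nat) :
    ((PySem.List.pyRange 1 ((m : Int) + 1) 1).map PySem.Int.toChars).flatten = upC m := by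
  induction m with
  | zero => simp [PySem.List.pyRange_one_eq_nil, upC]
  | succ m ih =>
      rw [show ((m + 1 : Nat) : Int) + 1 = ((m : Int) + 1) + 1 by push_cast; ring,
        PySem.List.pyRange_one_succ_right (by omega)]
      simp [upC, ih]

theorem mapDown (m : Nat) :
    ((PySem.List.pyRange (m : Int) 0 (-1)).map PySem.Int.toChars).flatten = downC m := by
  induction m with
  | zero => simp [PySem.List.pyRange_neg_one_eq_nil, downC]
  | succ m ih =>
      rw [show ((m + 1 : Nat) : Int) = (m : Int) + 1 by push_cast; ring,
        PySem.List.pyRange_neg_one_cons (by omega)]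
      simp [downC, ih]

theorem rowA (i : Int) (m : Nat) (hm : i = (m : Int) + 1) :
    PySem.Str.join ""
      ((PySem.List.pyRange (i - 1) 0 (-1)).foldl (fun acc k => acc ++ [PySem.Int.toStr k])
        ((PySem.List.pyRange 1 (i + 1) 1).foldl (fun acc j => acc ++ [PySem.Int.toStr j]) []))
    = String.ofList (upC (m + 1) ++ downC m) := by
  rw [PySem.List.foldl_append_singleton_eq_map, PySem.List.foldl_append_singleton_eq_map]
  have h1 := mapUp (m + 1)
  have h2 := mapDown m
  rw [show ((m + 1 : Nat) : Int) + 1 = ((m : Int) + 1) + 1 by push_cast; ring] at h1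
  simp only [PySem.Str.join, hm]
  rw [show ("".toList : List Char) = [] from rfl, joinNil]
  simp only [List.nil_append, List.map_append, List.map_map, List.flatten_append]
  have htl : (String.toList ∘ PySem.Int.toStr) = PySem.Int.toChars := by
    funext x; simp [PySem.Int.toList_toStr]
  rw [htl, show (m : Int) + 1 - 1 = (m : Int) by ring, h1, h2]

theorem Bstate (m : Nat) :
    (PySem.List.pyRange 1 ((m : Int) + 1) 1).foldl
      (fun (st : List String × List Char × List Char) i =>
        let up := st.2.1 ++ PySem.Int.toChars i
        (st.1 ++ [String.ofList (up ++ st.2.2)], up, PySem.Int.toChars i ++ st.2.2))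
      ([], [], [])
    = (rowsC m, upC m, downC m) := by
  induction m with
  | zero => simp [PySem.List.pyRange_one_eq_nil, rowsC, upC, downC]
  | succ m ih =>
      rw [show ((m + 1 : Nat) : Int) + 1 = ((m : Int) + 1) + 1 by push_cast; ring,
        PySem.List.pyRange_one_succ_right (by omega), List.foldl_append, ih]
      simp [rowsC, upC, downC]

theorem Ares (m : Nat) :
    (PySem.List.pyRange 1 ((m : Int) + 1) 1).foldl (fun res_arr i =>
      let row₁ := (PySem.List.pyRange 1 (i + 1) 1).foldl
        (fun acc j => acc ++ [PySem.Int.toStr j]) []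
      let row₂ := (PySem.List.pyRange (i - 1) 0 (-1)).foldl
        (fun acc k => acc ++ [PySem.Int.toStr k]) row₁
      res_arr ++ [PySem.Str.join "" row₂]) []
    = rowsC m := by
  induction m with
  | zero => simp [PySem.List.pyRange_one_eq_nil, rowsC]
  | succ m ih =>
      rw [show ((m + 1 : Nat) : Int) + 1 = ((m : Int) + 1) + 1 by push_cast; ring,
        PySem.List.pyRange_one_succ_right (by omega), List.foldl_append, ih]
      simp only [List.foldl_cons, List.foldl_nil, rowsC]
      rw [rowA ((m : Int) + 1) m rfl]

-- ===== VERDICT (by name: the statement is the Claim_ definition above) =====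
theorem solve_spec : Claim_equal_solve := by
  intro n _
  unfold Spec_solve solve solve_alt
  rcases (by omega : n ≤ 0 ∨ 0 < n) with h | h
  · rw [PySem.List.pyRange_one_eq_nil (by omega)]; rfl
  · have hn : n = ((n.toNat : Int)) := by omega
    rw [hn, Ares n.toNat, Bstate n.toNat]
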